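-- pv_equiv track=rewrite | github.com/Blackyfi/aws-manga-library | manga-scraper/scraper/src/processors/duplicate_detector.py | find_duplicates_in_batch
-- ===== SOURCE A (Python) =====
-- from typing import Set, Dict, Optional, List
-- from collections import defaultdict
--
-- def find_duplicates_in_batch(
--
--     hashes: List[str]
-- ) -> Dict[str, List[str]]:
--     """
--     Find duplicates within a batch of hashes
--
--     Args:
--         hashes: List of hashes to check
--
--     Returns:
--         Dictionary mapping each duplicate hash to list of its duplicates
--     """
--     duplicates = defaultdict(list)
--     seen = {}
--
--     for hash_val in hashes:
--         if hash_val in seen: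
--             duplicates[seen[hash_val]].append(hash_val)
--         else:
--             seen[hash_val] = hash_val
--
--     return dict(duplicates)
-- ===== SOURCE B (Python) =====
-- from collections import Counter
-- from typing import Dict, List
--
--
-- def find_duplicates_in_batch(hashes: List[str]) -> Dict[str, List[str]]:
--     # Count first, build second: total counts give each value list in one shot
--     # as (count - 1) copies; a prefix counter records the order in which each
--     # hash becomes a duplicate (its second occurrence).
--     counts = Counter(hashes)
--     order = []
--     prefix = Counter()
--     for h in hashes:
--         prefix[h] += 1
--         if prefix[h] == 2:
--             order.append(h)
--     return {h: [h] * (counts[h] - 1) for h in order}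
-- ===== Notes on version B (the rewrite author's own statement) =====
-- stated objective: alternative
-- what changed: Replaces A's single pass that simultaneously maintains a seen-dict and appends to per-key duplicate lists with a count-table-first decomposition: Counter(hashes) gives each value list in one shot as (count-1) copies, a prefix counter records second-occurrence order, and the result is built by one dict comprehension.
import Mathlib
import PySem

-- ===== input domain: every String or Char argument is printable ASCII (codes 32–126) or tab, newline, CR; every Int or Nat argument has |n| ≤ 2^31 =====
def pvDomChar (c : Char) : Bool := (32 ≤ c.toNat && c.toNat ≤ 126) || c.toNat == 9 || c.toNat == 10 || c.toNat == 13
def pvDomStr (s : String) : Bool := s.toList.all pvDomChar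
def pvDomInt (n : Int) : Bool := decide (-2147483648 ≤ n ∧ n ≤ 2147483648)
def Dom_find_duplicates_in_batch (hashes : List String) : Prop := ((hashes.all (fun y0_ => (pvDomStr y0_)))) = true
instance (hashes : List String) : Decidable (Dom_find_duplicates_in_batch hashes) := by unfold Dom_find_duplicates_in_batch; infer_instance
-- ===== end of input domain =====

-- B replaces A's one-pass seen-set/accumulator loop by a count-table-first decomposition
-- (total counts give each value list as count-1 copies; a prefix counter gives the key order).

-- ===== PORT A =====
-- loop body: if hash_val in seen: duplicates[seen[hash_val]].append(hash_val) else: seen[hash_val] = hash_val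
def aStep (st : PySem.Dict String (List String) × PySem.Dict String String) (h : String) :
    PySem.Dict String (List String) × PySem.Dict String String :=
  match st.2.get? h with
  | some s => (st.1.modify s [] (fun l => l ++ [h]), st.2)   -- defaultdict(list) append
  | none => (st.1, st.2.insert h h)

def find_duplicates_in_batch (hashes : List String) : List (String × List String) :=
  (hashes.foldl aStep (PySem.Dict.empty, PySem.Dict.empty)).1.items

-- ===== PORT B =====
-- loop body: prefix[h] += 1; if prefix[h] == 2: order.append(h)
def bStep (st : PySem.Dict String Int × List String) (h : String) :
    PySem.Dict String Int × List String :=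
  let pre := st.1.modify h 0 (· + 1)
  (pre, if pre.getD h 0 == 2 then st.2 ++ [h] else st.2)

def find_duplicates_in_batch_alt (hashes : List String) : List (String × List String) :=
  let counts := PySem.Dict.counter hashes
  let order := (hashes.foldl bStep (PySem.Dict.empty, [])).2
  order.map (fun h => (h, List.replicate (counts.getD h 0 - 1).toNat h))  -- [h] * (counts[h] - 1)

-- ===== PRECONDITION & SPEC =====
def Spec_find_duplicates_in_batch (hashes : List String) (out : List (String × List String)) : Prop := out = find_duplicates_in_batch_alt hashes
instance (hashes : List String) (out : List (String × List String)) : Decidable (Spec_find_duplicates_in_batch hashes out) := by unfold Spec_find_duplicates_in_batch; infer_instance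

-- ===== CLAIM (what is proved, stated in full; the proofs are below) =====
def Claim_equal_find_duplicates_in_batch : Prop := ∀ (hashes : List String), Dom_find_duplicates_in_batch hashes → Spec_find_duplicates_in_batch hashes (find_duplicates_in_batch hashes)

-- ===== LEMMAS AND PROOFS =====

-- Joint invariant of the two loops over the processed prefix l.
theorem loops_inv (l : List String) :
    (∀ x, (l.foldl aStep (PySem.Dict.empty, PySem.Dict.empty)).2.get? x
        = if x ∈ l then some x else none) ∧
    (l.foldl bStep (PySem.Dict.empty, [])).1 = PySem.Dict.counter l ∧
    (∀ y, y ∈ (l.foldl bStep (PySem.Dict.empty, [])).2 ↔ 2 ≤ l.count y) ∧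
    (l.foldl bStep (PySem.Dict.empty, [])).2.Nodup ∧
    (l.foldl aStep (PySem.Dict.empty, PySem.Dict.empty)).1.items
      = (l.foldl bStep (PySem.Dict.empty, [])).2.map
          (fun h => (h, List.replicate (l.count h - 1) h)) := by
  induction l using List.reverseRecOn with
  | nil =>
      exact ⟨fun x => by simp [PySem.Dict.get?_empty], rfl, fun y => by simp,
        List.nodup_nil, rfl⟩
  | append_singleton l x ih =>
      obtain ⟨hseen, hcnt, hmem, hnd, hitems⟩ := ih
      rw [List.foldl_append, List.foldl_append]
      set a := l.foldl aStep (PySem.Dict.empty, PySem.Dict.empty) with ha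
      set b := l.foldl bStep (PySem.Dict.empty, []) with hb
      simp only [List.foldl_cons, List.foldl_nil]
      have hcApp : ∀ y, (l ++ [x]).count y = l.count y + if y = x then 1 else 0 := by
        intro y
        by_cases h : y = x
        · subst h; simp [List.count_append]
        · have h' : ¬ x = y := fun he => h he.symm
          simp [List.count_append, h, h']
      have hkeys : a.1.keys = b.2 := by
        simp only [PySem.Dict.keys, hitems, List.map_map]
        have hcomp : ((fun p : String × List String => p.1) ∘
            fun h : String => (h, List.replicate (List.count h l - 1) h)) = id := rfl
        rw [hcomp, List.map_id]
      have hndk : a.1.keys.Nodup := by rw [hkeys]; exact hnd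
      have hcnt' : (bStep b x).1 = PySem.Dict.counter (l ++ [x]) := by
        simp only [bStep, hcnt, PySem.Dict.counter_append_singleton]
      have hpre : (b.1.modify x 0 (· + 1)).getD x 0 = (l.count x : Int) + 1 := by
        rw [PySem.Dict.getD_modify_self, hcnt, PySem.Dict.getD_counter]
      have hcond : ((b.1.modify x 0 (· + 1)).getD x 0 == 2) = decide (l.count x = 1) := by
        rw [hpre]
        by_cases h1 : l.count x = 1 <;> simp [h1] <;> omega
      by_cases hx : x ∈ l
      · -- seen before: A appends to duplicates[x]
        have hsx : a.2.get? x = some x := by rw [hseen]; simp [hx]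
        have hstep : aStep a x = (a.1.modify x [] (fun v => v ++ [x]), a.2) := by
          simp only [aStep, hsx]
        have hc1 : 1 ≤ l.count x := List.one_le_count_iff.mpr hx
        by_cases h2 : l.count x = 1
        · -- second occurrence: new key for both
          have hxo : x ∉ b.2 := fun h => by have := (hmem x).mp h; omega
          have hcont : a.1.contains x = false := by
            rw [PySem.Dict.contains_eq_decide_mem_keys, hkeys]
            simp [hxo]
          have hgd : a.1.getD x [] = [] := PySem.Dict.getD_of_not_contains _ _ hcont
          refine ⟨fun y => ?_, hcnt', fun y => ?_, ?_, ?_⟩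
          · simp only [hstep]
            rw [hseen]
            by_cases hy : y = x
            · subst hy; simp [hx]
            · simp [hy]
          · simp only [bStep, hcond, h2, decide_true, if_true]
            rw [hcApp y]
            by_cases hy : y = x
            · subst hy; simp [h2]
            · rw [if_neg hy]
              simp only [List.mem_append, List.mem_singleton, hy, or_false, hmem y]
              omega
          · simp only [bStep, hcond, h2, decide_true, if_true]
            exact List.Nodup.append hnd (List.nodup_singleton x) (by simpa using hxo)
          · simp only [bStep, hcond, h2, decide_true, if_true]
            simp only [hstep, PySem.Dict.modify, hgd]
            rw [PySem.Dict.items_insert_of_not_contains _ _ hcont, hitems, List.map_append]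
            congr 1
            · refine List.map_congr_left (fun h hh => ?_)
              have hne : h ≠ x := fun he => by
                have := (hmem h).mp hh; rw [he] at this; omega
              rw [hcApp h, if_neg hne, Nat.add_zero]
            · simp [hcApp, h2]
        · -- third or later occurrence: entry updated in place
          have hc2 : 2 ≤ l.count x := by omega
          have hxo : x ∈ b.2 := (hmem x).mpr hc2
          have hcont : a.1.contains x = true := by
            rw [PySem.Dict.contains_eq_decide_mem_keys, hkeys]
            simp [hxo]
          have hgd : a.1.getD x [] = List.replicate (l.count x - 1) x := by
            refine PySem.Dict.getD_of_mem_items _ ?_ hndk []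
            rw [hitems]
            exact List.mem_map.mpr ⟨x, hxo, rfl⟩
          refine ⟨fun y => ?_, hcnt', fun y => ?_, ?_, ?_⟩
          · simp only [hstep]
            rw [hseen]
            by_cases hy : y = x
            · subst hy; simp [hx]
            · simp [hy]
          · simp only [bStep, hcond, h2, decide_false, Bool.false_eq_true, if_false]
            rw [hcApp y, hmem y]
            by_cases hy : y = x
            · subst hy; rw [if_pos rfl]; omega
            · rw [if_neg hy]; omega
          · simpa only [bStep, hcond, h2, decide_false, Bool.false_eq_true,
              if_false] using hnd
          · simp only [bStep, hcond, h2, decide_false, Bool.false_eq_true, if_false]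
            simp only [hstep, PySem.Dict.modify, hgd]
            rw [PySem.Dict.items_insert_of_contains _ _ hcont, hitems, List.map_map]
            refine List.map_congr_left (fun h hh => ?_)
            by_cases hy : h = x
            · subst hy
              simp only [Function.comp, beq_self_eq_true, if_true]
              have hrep : List.replicate (l.count h - 1) h ++ [h]
                  = List.replicate (l.count h) h := by
                conv_rhs => rw [show l.count h = (l.count h - 1) + 1 by omega]
                simp [List.replicate_succ']
              rw [hrep, hcApp h, if_pos rfl, Nat.add_sub_cancel]
            · have hne : (h == x) = false := by simp [hy]
              simp only [Function.comp, hne, Bool.false_eq_true, if_false,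
                hcApp h, if_neg hy, Nat.add_zero]
      · -- first occurrence: A records it in seen, duplicates unchanged
        have hsx : a.2.get? x = none := by rw [hseen]; simp [hx]
        have hstep : aStep a x = (a.1, a.2.insert x x) := by
          simp only [aStep, hsx]
        have hc0 : l.count x = 0 := List.count_eq_zero.mpr hx
        have h2 : ¬ l.count x = 1 := by omega
        refine ⟨fun y => ?_, hcnt', fun y => ?_, ?_, ?_⟩
        · simp only [hstep]
          rw [PySem.Dict.get?_insert, hseen]
          by_cases hy : y = x
          · subst hy; simp [hx]
          · simp [hy]
        · simp only [bStep, hcond, h2, decide_false, Bool.false_eq_true, if_false]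
          rw [hcApp y, hmem y]
          by_cases hy : y = x
          · subst hy; rw [if_pos rfl]
            constructor <;> intro h <;> omega
          · rw [if_neg hy]; omega
        · simpa only [bStep, hcond, h2, decide_false, Bool.false_eq_true,
            if_false] using hnd
        · simp only [bStep, hcond, h2, decide_false, Bool.false_eq_true, if_false]
          simp only [hstep, hitems]
          refine List.map_congr_left (fun h hh => ?_)
          have hne : h ≠ x := fun he => by
            have := (hmem h).mp hh; rw [he] at this; omega
          rw [hcApp h, if_neg hne, Nat.add_zero]

-- ===== VERDICT (by name: the statement is the Claim_ definition above) =====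
theorem find_duplicates_in_batch_spec : Claim_equal_find_duplicates_in_batch := by
  intro hashes _
  unfold Spec_find_duplicates_in_batch find_duplicates_in_batch find_duplicates_in_batch_alt
  obtain ⟨-, -, -, -, hitems⟩ := loops_inv hashes
  rw [hitems]
  refine List.map_congr_left (fun h _ => ?_)
  rw [PySem.Dict.getD_counter]
  have hc : ((hashes.count h : Int) - 1).toNat = hashes.count h - 1 := by omega
  rw [hc]
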